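-- pv_equiv track=rewrite | github.com/rajatcodes/leetcode-solutions | valid_unicode.py | get_byte_count
-- ===== SOURCE A (Python) =====
-- def get_byte_count(byte):
--     shiftbit = 8-1
--     mask = 1 << shiftbit
--     n = 0
--     while(n<=8):
--         if(mask & byte):
--             mask = mask >> 1
--             n+=1
--         else:
--             break
--     return n
-- ===== SOURCE B (Python) =====
-- def get_byte_count(byte):
--     return 8 - (((byte & 0xFF) ^ 0xFF)).bit_length()
-- ===== Notes on version B (the rewrite author's own statement) =====
-- stated objective: simpler
-- what changed: Replaced the bit-by-bit while loop over mask positions with a closed form: mask to the low byte, XOR with 0xFF to flip the bits, and derive the leading-one count from the complement's bit_length.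
import Mathlib
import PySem

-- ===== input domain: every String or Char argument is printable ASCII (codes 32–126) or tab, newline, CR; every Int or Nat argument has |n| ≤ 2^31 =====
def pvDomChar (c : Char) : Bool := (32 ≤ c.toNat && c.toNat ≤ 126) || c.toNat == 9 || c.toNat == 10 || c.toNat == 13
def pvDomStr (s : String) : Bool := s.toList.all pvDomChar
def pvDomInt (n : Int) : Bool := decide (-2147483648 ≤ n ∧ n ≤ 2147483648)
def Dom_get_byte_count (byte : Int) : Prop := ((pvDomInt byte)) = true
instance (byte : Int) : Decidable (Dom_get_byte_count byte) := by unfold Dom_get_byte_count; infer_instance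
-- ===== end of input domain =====

-- B replaces A's bit-by-bit while loop by a closed form: the leading-one count of the low byte read off the bit_length of its XOR-complement (objective: simpler).

-- ===== PORT A =====
-- while n<=8: if mask & byte: mask >>= 1; n += 1 else: break
-- fuel 9 suffices: after 8 shifts mask = 0 and the loop breaks, so at most 8 recursive steps occur
def pvLoopA (byte mask n : Int) : Nat → Int
  | 0 => n
  | fuel+1 =>
    if n ≤ 8 then
      if PySem.Int.band mask byte ≠ 0 then pvLoopA byte (mask >>> (1:Nat)) (n+1) fuel
      else n
    else n

def get_byte_count (byte : Int) : Int :=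
  let shiftbit : Nat := 8 - 1
  let mask : Int := 1 <<< shiftbit
  pvLoopA byte mask 0 9

-- ===== PORT B =====
def get_byte_count_alt (byte : Int) : Int :=
  8 - (PySem.Int.bitLength (PySem.Int.bxor (PySem.Int.band byte 255) 255) : Int)

-- ===== PRECONDITION & SPEC =====
def Spec_get_byte_count (byte : Int) (out : Int) : Prop := out = get_byte_count_alt byte
instance (byte : Int) (out : Int) : Decidable (Spec_get_byte_count byte out) := by unfold Spec_get_byte_count; infer_instance

-- ===== CLAIM (what is proved, stated in full; the proofs are below) =====
def Claim_equal_get_byte_count : Prop := ∀ (byte : Int), Dom_get_byte_count byte → Spec_get_byte_count byte (get_byte_count byte)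

-- ===== LEMMAS AND PROOFS =====

-- for an 8-bit mask M, M - (M &&& x) (x < 256) equals M &&& (8-bit complement of x)
set_option maxRecDepth 16384 in
set_option maxHeartbeats 1000000 in
theorem pv_sub_and (M x : Fin 256) : M.val - (M.val &&& x.val) = M.val &&& (255 - x.val) := by
  revert M x; decide

-- an 8-bit mask only sees x mod 256
theorem pv_and_mod (M x : ℕ) (hM : M < 256) : M &&& x = M &&& (x % 256) := by
  apply Nat.eq_of_testBit_eq
  intro i
  simp only [Nat.testBit_and, Nat.testBit_mod_two_pow (j := 8)]
  by_cases h : i < 8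
  · simp [h]
  · have : M < 2 ^ i := lt_of_lt_of_le hM (by
      calc (256:ℕ) = 2 ^ 8 := by norm_num
      _ ≤ 2 ^ i := Nat.pow_le_pow_right (by norm_num) (by omega))
    simp [Nat.testBit_lt_two_pow this, h]

-- PySem.Int.band with an 8-bit mask depends only on byte mod 256
theorem pv_band_mod (M : ℕ) (hM : M < 256) (byte : Int) :
    PySem.Int.band (M : Int) byte = PySem.Int.band (M : Int) (byte % 256) := by
  have hr0 : 0 ≤ byte % 256 := Int.emod_nonneg byte (by norm_num)
  by_cases hb : 0 ≤ byte
  · rw [PySem.Int.band_of_nonneg (by positivity) hb,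
        PySem.Int.band_of_nonneg (by positivity) hr0]
    have h1 : ((M : Int)).toNat = M := by simp
    have h2 : (byte % 256).toNat = byte.toNat % 256 := by omega
    rw [h1, h2, ← pv_and_mod M byte.toNat hM]
  · have hbneg : byte < 0 := by omega
    have hm0 : (0:Int) ≤ -byte - 1 := by omega
    unfold PySem.Int.band
    rw [if_pos (by positivity), if_neg (by omega), if_pos (by positivity), if_pos hr0]
    have h1 : ((M : Int)).toNat = M := by simp
    have h2 : (byte % 256).toNat = 255 - ((-byte - 1).toNat % 256) := by omega
    rw [h1, h2, pv_and_mod M ((-byte - 1).toNat) hM]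
    have hx : (-byte - 1).toNat % 256 < 256 := Nat.mod_lt _ (by norm_num)
    exact_mod_cast congrArg (Nat.cast : ℕ → ℤ)
      (pv_sub_and ⟨M, hM⟩ ⟨(-byte - 1).toNat % 256, hx⟩)

-- the A-loop's mask is always 0 or a power of two below 256
theorem pv_loop_mod (byte : Int) (fuel : Nat) (mask n : Int)
    (hm : mask = 0 ∨ ∃ k : Nat, k < 8 ∧ mask = ((2 ^ k : ℕ) : Int)) :
    pvLoopA byte mask n fuel = pvLoopA (byte % 256) mask n fuel := by
  induction fuel generalizing mask n with
  | zero => rfl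
  | succ fuel ih =>
    unfold pvLoopA
    rcases hm with h0 | ⟨k, hk, hpk⟩
    · subst h0
      have hz : ∀ b : Int, PySem.Int.band 0 b = 0 := by
        intro b
        rw [PySem.Int.band_comm]
        exact PySem.Int.band_zero b
      simp [hz]
    · subst hpk
      have hcond : PySem.Int.band ((2 ^ k : ℕ) : Int) byte
          = PySem.Int.band ((2 ^ k : ℕ) : Int) (byte % 256) := by
        apply pv_band_mod
        calc (2:ℕ) ^ k < 2 ^ 8 := Nat.pow_lt_pow_right (by norm_num) hk
        _ = 256 := by norm_num
      rw [hcond]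
      by_cases h1 : n ≤ 8
      · by_cases h2 : PySem.Int.band ((2 ^ k : ℕ) : Int) (byte % 256) ≠ 0
        · rw [if_pos h1, if_pos h1, if_pos h2, if_pos h2]
          apply ih
          rcases Nat.eq_zero_or_pos k with hk0 | hkp
          · left; subst hk0; decide
          · right
            refine ⟨k - 1, by omega, ?_⟩
            have : ((2 ^ k : ℕ) : Int) = ((2 ^ (k - 1) : ℕ) : Int) * 2 := by
              push_cast
              rw [← pow_succ]
              congr 1
              omega
            rw [this]
            simp [Int.shiftRight_eq_div_pow]
        · rw [if_pos h1, if_pos h1, if_neg h2, if_neg h2]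
      · rw [if_neg h1, if_neg h1]

theorem pv_A_mod (byte : Int) : get_byte_count byte = get_byte_count (byte % 256) := by
  unfold get_byte_count
  exact pv_loop_mod byte 9 _ 0 (Or.inr ⟨7, by omega, by decide⟩)

theorem pv_B_mod (byte : Int) : get_byte_count_alt byte = get_byte_count_alt (byte % 256) := by
  unfold get_byte_count_alt
  rw [PySem.Int.band_comm byte 255, PySem.Int.band_comm (byte % 256) 255]
  have h := pv_band_mod 255 (by norm_num) byte
  norm_num at h
  rw [h]

set_option maxRecDepth 16384 in
theorem pv_small (r : Fin 256) : get_byte_count ((r.val : ℕ) : Int) = get_byte_count_alt ((r.val : ℕ) : Int) := by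
  revert r; decide

-- ===== VERDICT (by name: the statement is the Claim_ definition above) =====
theorem get_byte_count_spec : Claim_equal_get_byte_count := by
  intro byte _
  unfold Spec_get_byte_count
  rw [pv_A_mod byte, pv_B_mod byte]
  have h0 : 0 ≤ byte % 256 := Int.emod_nonneg byte (by norm_num)
  have h1 : byte % 256 < 256 := Int.emod_lt_of_pos byte (by norm_num)
  have h2 : byte % 256 = (((byte % 256).toNat : ℕ) : Int) := by omega
  have h3 : (byte % 256).toNat < 256 := by omega
  rw [h2]
  exact pv_small ⟨(byte % 256).toNat, h3⟩
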